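-- pv_equiv track=rewrite | github.com/SeraphWedd/CodeChef_Codes-Python-3.x- | beginner/VCS.py | count
-- ===== SOURCE A (Python) =====
-- def count(a, b, n):
--     bothti = 0
--     bothuu = 0
--     for x in range(1, n+1):
--         if (x in a) and (x in b):
--             bothti += 1
--         elif (x not in a) and (x not in b):
--             bothuu += 1
--     return bothti, bothuu
-- ===== SOURCE B (Python) =====
-- def count(a, b, n):
--     u = range(1, n + 1)
--     sa = {x for x in a if x in u}
--     sb = {x for x in b if x in u}
--     return len(sa & sb), len(u) - len(sa | sb)
-- ===== Notes on version B (the rewrite author's own statement) =====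
-- stated objective: faster
-- what changed: Replaces the element-wise scan over range(1,n+1) with its O(|a|+|b|) list membership tests by set arithmetic on the in-range elements of a and b: both = |sa∩sb|, neither = len(range) - |sa∪sb|.
import Mathlib
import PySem

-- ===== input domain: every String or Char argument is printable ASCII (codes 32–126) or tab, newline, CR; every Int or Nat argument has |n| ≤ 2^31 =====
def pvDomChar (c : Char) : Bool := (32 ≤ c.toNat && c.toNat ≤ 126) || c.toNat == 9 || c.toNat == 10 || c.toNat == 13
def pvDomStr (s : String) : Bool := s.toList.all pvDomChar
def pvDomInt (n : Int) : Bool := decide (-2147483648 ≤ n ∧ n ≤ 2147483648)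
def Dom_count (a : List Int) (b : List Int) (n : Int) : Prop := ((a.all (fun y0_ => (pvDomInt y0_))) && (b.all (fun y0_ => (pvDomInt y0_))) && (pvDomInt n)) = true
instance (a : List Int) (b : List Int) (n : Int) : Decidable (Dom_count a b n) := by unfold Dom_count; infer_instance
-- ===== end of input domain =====

-- B replaces A's scan over range(1,n+1) with list membership tests by set-cardinality
-- arithmetic: both = |U∩A∩B|, neither = |U| - |U∩(A∪B)|; timing-checked faster.

-- ===== PORT A =====
-- for x in range(1, n+1): if x in a and x in b: bothti += 1 elif x not in a and x not in b: bothuu += 1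
def count (a : List Int) (b : List Int) (n : Int) : Int × Int :=
  (PySem.List.pyRange 1 (n + 1) 1).foldl
    (fun (st : Int × Int) x =>
      if a.contains x && b.contains x then (st.1 + 1, st.2)
      else if !a.contains x && !b.contains x then (st.1, st.2 + 1)
      else st)
    (0, 0)

-- ===== PORT B =====
def count_alt (a : List Int) (b : List Int) (n : Int) : Int × Int :=
  -- 'x in u' for u = range(1, n+1) and int x is the O(1) bounds test 1 <= x <= n
  let inU : Int → Bool := fun x => decide (1 ≤ x) && decide (x ≤ n)
  let sa := PySem.Set.ofList (a.filter inU)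
  let sb := PySem.Set.ofList (b.filter inU)
  -- len(range(1, n+1)) = max(n, 0)
  (PySem.Set.len (PySem.Set.inter sa sb),
   max n 0 - PySem.Set.len (PySem.Set.union sa sb))

-- ===== PRECONDITION & SPEC =====
def Spec_count (a : List Int) (b : List Int) (n : Int) (out : Int × Int) : Prop := out = count_alt a b n
instance (a : List Int) (b : List Int) (n : Int) (out : Int × Int) : Decidable (Spec_count a b n out) := by unfold Spec_count; infer_instance

-- ===== CLAIM (what is proved, stated in full; the proofs are below) =====
def Claim_equal_count : Prop := ∀ (a : List Int) (b : List Int) (n : Int), Dom_count a b n → Spec_count a b n (count a b n)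

-- ===== LEMMAS AND PROOFS =====

-- A's two-counter fold over any list is the pair of countP's of its two tests.
theorem count_foldl_eq_countP (a b : List Int) (l : List Int) (t u : Int) :
    l.foldl
      (fun (st : Int × Int) x =>
        if a.contains x && b.contains x then (st.1 + 1, st.2)
        else if !a.contains x && !b.contains x then (st.1, st.2 + 1)
        else st)
      (t, u)
    = (t + (l.countP (fun x => a.contains x && b.contains x) : Int),
       u + (l.countP (fun x => !a.contains x && !b.contains x) : Int)) := by
  induction l generalizing t u with
  | nil => simp
  | cons x xs ih =>
    rw [List.foldl_cons, List.countP_cons, List.countP_cons]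
    by_cases h1 : (a.contains x && b.contains x) = true
    · have h2 : (!a.contains x && !b.contains x) = false := by
        cases ha : a.contains x <;> cases hb : b.contains x <;> simp_all
      rw [if_pos h1, ih, h1, h2]
      simp [Prod.ext_iff]
      omega
    · rw [if_neg h1]
      by_cases h2 : (!a.contains x && !b.contains x) = true
      · rw [if_pos h2, ih, h2, eq_false_of_ne_true h1]
        simp [Prod.ext_iff]
        omega
      · rw [if_neg h2, ih, eq_false_of_ne_true h1, eq_false_of_ne_true h2]
        simp

-- two duplicate-free lists with the same members have the same length
theorem length_eq_of_nodup_of_mem_iff (l1 l2 : List Int) (h1 : l1.Nodup) (h2 : l2.Nodup)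
    (h : ∀ x, x ∈ l1 ↔ x ∈ l2) : l1.length = l2.length :=
  List.Perm.length_eq ((List.perm_ext_iff_of_nodup h1 h2).mpr h)

-- ===== VERDICT (by name: the statement is the Claim_ definition above) =====
theorem count_spec : Claim_equal_count := by
  intro a b n _
  show count a b n = count_alt a b n
  have hr := PySem.List.nodup_pyRange_one (a := (1 : Int)) (b := n + 1)
  unfold count count_alt
  rw [count_foldl_eq_countP]
  simp only [PySem.Set.len]
  have hboth : ((PySem.List.pyRange 1 (n + 1) 1).countP (fun x => a.contains x && b.contains x))
      = (PySem.Set.inter (PySem.Set.ofList (a.filter (fun x => decide (1 ≤ x) && decide (x ≤ n))))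
          (PySem.Set.ofList (b.filter (fun x => decide (1 ≤ x) && decide (x ≤ n))))).length := by
    rw [List.countP_eq_length_filter]
    apply length_eq_of_nodup_of_mem_iff
    · exact hr.filter _
    · exact (PySem.Set.nodup_ofList _).filter _
    · intro x
      simp only [List.mem_filter, PySem.Set.mem_inter, PySem.Set.mem_ofList,
        PySem.List.mem_pyRange_one, Bool.and_eq_true, List.contains_eq_mem,
        decide_eq_true_eq, Int.lt_add_one_iff]
      tauto
  have heither : ((PySem.List.pyRange 1 (n + 1) 1).countP (fun x => a.contains x || b.contains x))
      = (PySem.Set.union (PySem.Set.ofList (a.filter (fun x => decide (1 ≤ x) && decide (x ≤ n))))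
          (PySem.Set.ofList (b.filter (fun x => decide (1 ≤ x) && decide (x ≤ n))))).length := by
    rw [List.countP_eq_length_filter]
    apply length_eq_of_nodup_of_mem_iff
    · exact hr.filter _
    · exact PySem.Set.nodup_union _ _ (PySem.Set.nodup_ofList _)
    · intro x
      simp only [List.mem_filter, PySem.Set.mem_union, PySem.Set.mem_ofList,
        PySem.List.mem_pyRange_one, Bool.or_eq_true, Bool.and_eq_true,
        List.contains_eq_mem, decide_eq_true_eq, Int.lt_add_one_iff]
      tauto
  have hlen := List.length_eq_countP_add_countP (l := PySem.List.pyRange 1 (n + 1) 1)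
    (p := fun x => a.contains x || b.contains x)
  have hnot : (PySem.List.pyRange 1 (n + 1) 1).countP
        (fun x => decide ¬((a.contains x || b.contains x) = true))
      = (PySem.List.pyRange 1 (n + 1) 1).countP (fun x => !a.contains x && !b.contains x) := by
    apply List.countP_congr
    intro x _
    by_cases ha : x ∈ a <;> by_cases hb : x ∈ b <;>
      simp [List.contains_eq_mem, ha, hb]
  have hrange : (PySem.List.pyRange 1 (n + 1) 1).length = (n + 1 - 1).toNat :=
    PySem.List.length_pyRange_one 1 (n + 1)
  refine Prod.ext ?_ ?_
  · show (0 : Int) + _ = _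
    rw [zero_add, hboth]
  · show (0 : Int) + _ = _
    rw [zero_add]
    omega
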